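-- pv_equiv track=rewrite | github.com/drapeaucharles/restaurant_chat | services/conversation_summary.py | should_summarize_conversation
-- ===== SOURCE A (Python) =====
-- from typing import Any
--
-- from typing import Dict, List, Optional
--
-- def should_summarize_conversation(
--
--     messages: List[Dict[str, Any]]
-- ) -> bool:
--     """Determine if a conversation should be summarized"""
--     # Summarize if:
--     # - More than 5 messages
--     # - Conversation lasted more than 5 minutes
--     # - Customer asked questions or made requests
--
--     if len(messages) < 5:
--         return False
--
--     has_questions = any(
--         '?' in msg.get('message', '')
--         for msg in messages
--         if msg.get('sender_type') == 'client'
--     )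
--
--     has_requests = any(
--         any(word in msg.get('message', '').lower() for word in ['order', 'book', 'recommend', 'suggest'])
--         for msg in messages
--         if msg.get('sender_type') == 'client'
--     )
--
--     return has_questions or has_requests or len(messages) > 10
-- ===== SOURCE B (Python) =====
-- def should_summarize_conversation(messages):
--     """Determine if a conversation should be summarized.
--
--     Instead of scanning the message list per criterion, build ONE joined
--     lowercased transcript of all client messages ('\n'-separated so that no
--     keyword can straddle a boundary) and run each token as a single substring
--     search over it."""
--     if len(messages) < 5:
--         return False
--     if len(messages) > 10:
--         return True
--     blob = "\n".join(m.get('message', '') for m in messages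
--                      if m.get('sender_type') == 'client').lower()
--     return any(tok in blob for tok in ('?', 'order', 'book', 'recommend', 'suggest'))
-- ===== Notes on version B (the rewrite author's own statement) =====
-- stated objective: alternative
-- what changed: B replaces A's two per-message any() scans by joining all client messages into one newline-separated lowercased transcript string and running each of the five tokens ('?' and the four request keywords) as a single substring search over it, with the len>10 fallback hoisted into an early return.
import Mathlib
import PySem

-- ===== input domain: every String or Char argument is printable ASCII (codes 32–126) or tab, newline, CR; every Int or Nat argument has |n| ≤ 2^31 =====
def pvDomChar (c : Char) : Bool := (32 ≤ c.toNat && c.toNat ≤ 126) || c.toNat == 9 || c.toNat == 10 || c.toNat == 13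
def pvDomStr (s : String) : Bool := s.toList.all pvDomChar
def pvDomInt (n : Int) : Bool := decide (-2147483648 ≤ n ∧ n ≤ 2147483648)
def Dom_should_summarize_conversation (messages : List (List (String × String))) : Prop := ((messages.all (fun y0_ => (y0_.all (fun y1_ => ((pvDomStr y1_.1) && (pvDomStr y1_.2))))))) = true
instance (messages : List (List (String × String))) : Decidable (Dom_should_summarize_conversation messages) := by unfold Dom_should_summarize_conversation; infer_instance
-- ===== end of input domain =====

-- B joins all client messages into one newline-separated lowercased transcript and
-- searches each token in that single string; same return value everywhere (alternative algorithm).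

-- ===== PORT A =====
-- msg.get(k, d) on the assoc-list dict
def pvMsgGet (m : List (String × String)) (k d : String) : String :=
  PySem.Dict.getD (PySem.Dict.ofList m) k d

def pvKeywords : List String := ["order", "book", "recommend", "suggest"]

def should_summarize_conversation (messages : List (List (String × String))) : Bool :=
  if messages.length < 5 then false
  else
    let has_questions := (messages.filter (fun m => pvMsgGet m "sender_type" "" == "client")).any
      (fun m => PySem.Str.isIn "?" (pvMsgGet m "message" ""))
    let has_requests := (messages.filter (fun m => pvMsgGet m "sender_type" "" == "client")).any
      (fun m => pvKeywords.any (fun w => PySem.Str.isIn w (PySem.Str.lower (pvMsgGet m "message" ""))))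
    has_questions || has_requests || decide (messages.length > 10)

-- ===== PORT B =====
def pvTokens : List String := ["?", "order", "book", "recommend", "suggest"]

def should_summarize_conversation_alt (messages : List (List (String × String))) : Bool :=
  if messages.length < 5 then false
  else if messages.length > 10 then true
  else
    let blob := PySem.Str.lower (PySem.Str.join "\n"
      ((messages.filter (fun m => pvMsgGet m "sender_type" "" == "client")).map
        (fun m => pvMsgGet m "message" "")))
    pvTokens.any (fun tok => PySem.Str.isIn tok blob)

-- ===== PRECONDITION & SPEC =====
def Spec_should_summarize_conversation (messages : List (List (String × String))) (out : Bool) : Prop := out = should_summarize_conversation_alt messages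
instance (messages : List (List (String × String))) (out : Bool) : Decidable (Spec_should_summarize_conversation messages out) := by unfold Spec_should_summarize_conversation; infer_instance

-- ===== CLAIM (what is proved, stated in full; the proofs are below) =====
def Claim_equal_should_summarize_conversation : Prop := ∀ (messages : List (List (String × String))), Dom_should_summarize_conversation messages → Spec_should_summarize_conversation messages (should_summarize_conversation messages)

-- ===== LEMMAS AND PROOFS =====

-- two any's over one list fuse into one
theorem pvAnyOr {a : Type} (f g : a → Bool) (l : List a) :
    (l.any f || l.any g) = l.any (fun x => f x || g x) := by
  induction l with
  | nil => rfl
  | cons x t ih =>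
    simp only [List.any_cons, ← ih]
    cases f x <;> cases g x <;> simp

-- an occurrence of t, which avoids c, cannot straddle the separator c
theorem pvInfixSplit (t a b : List Char) (c : Char) (hc : c ∉ t) :
    t <:+: a ++ c :: b ↔ t <:+: a ∨ t <:+: b := by
  constructor
  · intro h
    induction a with
    | nil =>
      rw [List.nil_append] at h
      rcases List.infix_cons_iff.mp h with hp | hi
      · cases t with
        | nil => exact Or.inl (List.nil_infix)
        | cons d t' =>
          rcases List.cons_prefix_cons.mp hp with ⟨rfl, _⟩
          exact absurd List.mem_cons_self hc
      · exact Or.inr hi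
    | cons x a' ih =>
      rcases List.infix_cons_iff.mp h with hp | hi
      · left
        have hp' : t <+: (x :: a') ++ c :: b := hp
        have hlen : t.length ≤ (x :: a').length := by
          by_contra hgt
          simp at hgt
          have hi2 : (x :: a').length < t.length := hgt
          have hib : (x :: a').length < ((x :: a') ++ c :: b).length := by
            simp
          have := hp'.getElem (i := (x :: a').length) hi2
          rw [List.getElem_append_right (Nat.le_refl _)] at this
          simp at this
          exact hc (this ▸ List.getElem_mem hi2)
        have ht : t = List.take t.length ((x :: a') ++ c :: b) :=
          List.prefix_iff_eq_take.mp hp'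
        rw [List.take_append_of_le_length hlen] at ht
        rw [ht]
        exact (List.take_prefix t.length (x :: a')).isInfix
      · rcases ih hi with h1 | h2
        · exact Or.inl (List.infix_cons h1)
        · exact Or.inr h2
  · rintro (h | h)
    · exact h.trans ⟨[], c :: b, by simp⟩
    · obtain ⟨s, u, rfl⟩ := h
      exact ⟨a ++ c :: s, u, by simp⟩

-- a token without the separator sits in the join iff it sits in some part
theorem pvInfixJoin (t : List Char) (ht : t ≠ []) (hc : ('\n' : Char) ∉ t) :
    ∀ parts : List (List Char),
      (t <:+: PySem.Chars.join ['\n'] parts ↔ ∃ p ∈ parts, t <:+: p)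
  | [] => by
    rw [PySem.Chars.join_nil, List.infix_nil]
    simp [ht]
  | [p] => by
    rw [PySem.Chars.join_singleton]
    simp
  | p :: q :: rest => by
    rw [PySem.Chars.join_cons_cons]
    have : p ++ ['\n'] ++ PySem.Chars.join ['\n'] (q :: rest)
        = p ++ '\n' :: PySem.Chars.join ['\n'] (q :: rest) := by simp
    rw [this, pvInfixSplit t p _ '\n' hc]
    rw [pvInfixJoin t ht hc (q :: rest)]
    simp

-- lowercasing commutes with the newline join
theorem pvLowerJoin : ∀ parts : List (List Char),
    PySem.Chars.lower (PySem.Chars.join ['\n'] parts)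
      = PySem.Chars.join ['\n'] (parts.map PySem.Chars.lower)
  | [] => by simp [PySem.Chars.join_nil, PySem.Chars.lower]
  | [p] => by simp [PySem.Chars.join_singleton]
  | p :: q :: rest => by
    rw [List.map_cons, List.map_cons, PySem.Chars.join_cons_cons, PySem.Chars.join_cons_cons,
      ← List.map_cons, ← pvLowerJoin (q :: rest)]
    simp [PySem.Chars.lower, PySem.Chars.lowerChar, PySem.Chars.isupper]

-- only '?' lowercases to '?'
theorem pvLowerCharQ (c : Char) : PySem.Chars.lowerChar c = '?' ↔ c = '?' := by
  unfold PySem.Chars.lowerChar PySem.Chars.isupper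
  split_ifs with h
  · simp only [Bool.and_eq_true, decide_eq_true_eq] at h
    constructor
    · intro he
      exfalso
      have h1 : (65 : Nat) ≤ c.toNat := h.1
      have h2 : c.toNat ≤ 90 := h.2
      have := congrArg Char.toNat he
      rw [Char.toNat_ofNat, if_pos (Or.inl (by omega))] at this
      have h63 : ('?' : Char).toNat = 63 := by decide
      omega
    · intro he
      subst he
      simp at h
  · exact Iff.rfl

-- '?' is in a string iff it is in its lowercase
theorem pvIsInQLower (s : String) :
    PySem.Str.isIn "?" (PySem.Str.lower s) = PySem.Str.isIn "?" s := by
  rw [Bool.eq_iff_iff, PySem.Str.isIn_eq, PySem.Str.isIn_eq, PySem.Str.toList_lower]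
  have hq : ("?" : String).toList = ['?'] := by decide
  rw [hq, PySem.Chars.isIn_iff_infix, PySem.Chars.isIn_iff_infix,
    List.singleton_infix_iff, List.singleton_infix_iff]
  unfold PySem.Chars.lower
  simp only [List.mem_map]
  constructor
  · rintro ⟨c, hcm, hce⟩
    exact (pvLowerCharQ c).mp hce ▸ ((pvLowerCharQ c).mp hce ▸ hcm)
  · intro hm
    exact ⟨'?', hm, by decide⟩

-- search the five tokens in the joined lowered transcript = search them per part
theorem pvSwap (texts : List String) :
    pvTokens.any (fun tok => PySem.Str.isIn tok (PySem.Str.lower (PySem.Str.join "\n" texts)))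
      = texts.any (fun t => pvTokens.any (fun tok => PySem.Str.isIn tok (PySem.Str.lower t))) := by
  rw [Bool.eq_iff_iff]
  have hnl : ("\n" : String).toList = ['\n'] := by decide
  simp only [List.any_eq_true, PySem.Str.isIn_eq, PySem.Str.toList_lower, PySem.Str.toList_join,
    hnl, pvLowerJoin, PySem.Chars.isIn_iff_infix]
  constructor
  · rintro ⟨tok, htok, h⟩
    have hside : tok.toList ≠ [] ∧ ('\n' : Char) ∉ tok.toList := by
      fin_cases htok <;> exact ⟨by decide, by decide⟩
    rcases (pvInfixJoin tok.toList hside.1 hside.2 _).mp h with ⟨p, hp, hinf⟩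
    rw [List.mem_map] at hp
    obtain ⟨q, hq, rfl⟩ := hp
    rw [List.mem_map] at hq
    obtain ⟨s, hs, rfl⟩ := hq
    exact ⟨s, hs, tok, htok, hinf⟩
  · rintro ⟨s, hs, tok, htok, h⟩
    have hside : tok.toList ≠ [] ∧ ('\n' : Char) ∉ tok.toList := by
      fin_cases htok <;> exact ⟨by decide, by decide⟩
    refine ⟨tok, htok, (pvInfixJoin tok.toList hside.1 hside.2 _).mpr ?_⟩
    exact ⟨PySem.Chars.lower s.toList, by
      rw [List.mem_map]
      exact ⟨s.toList, List.mem_map_of_mem hs, rfl⟩, h⟩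

-- per message, A's two tests equal B's five-token test on the lowered text
theorem pvPerMsg (s : String) :
    (PySem.Str.isIn "?" s
      || pvKeywords.any (fun w => PySem.Str.isIn w (PySem.Str.lower s)))
    = pvTokens.any (fun tok => PySem.Str.isIn tok (PySem.Str.lower s)) := by
  simp only [pvTokens, pvKeywords, List.any_cons, List.any_nil, Bool.or_false]
  rw [pvIsInQLower]

-- ===== VERDICT (by name: the statement is the Claim_ definition above) =====
theorem should_summarize_conversation_spec : Claim_equal_should_summarize_conversation := by
  intro messages _
  unfold Spec_should_summarize_conversation
  unfold should_summarize_conversation should_summarize_conversation_alt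
  by_cases h5 : messages.length < 5
  · simp [h5]
  · by_cases h10 : messages.length > 10
    · simp [h5, h10]
    · simp only [h5, h10, if_false, decide_false, Bool.or_false]
      rw [pvAnyOr, pvSwap, List.any_map]
      refine List.any_congr rfl (fun m => ?_)
      simp only [Function.comp_apply]
      exact pvPerMsg (pvMsgGet m "message" "")
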